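-- pv_equiv track=rewrite | github.com/muhammed-shmail/Book2Vision | src/analysis.py | chapter_segmentation
-- ===== SOURCE A (Python) =====
-- def chapter_segmentation(text):
--     """
--     Segments text into chapters based on headings.
--     Simple heuristic: Look for "Chapter" or all-caps lines.
--     """
--     chapters = []
--     lines = text.split('\n')
--     current_chapter = {"title": "Introduction", "content": ""}
--
--     for line in lines:
--         if line.strip().lower().startswith("chapter") or (line.isupper() and len(line.strip()) < 50):
--             if current_chapter["content"].strip():
--                 chapters.append(current_chapter)
--             current_chapter = {"title": line.strip(), "content": ""}
--         else:
--             current_chapter["content"] += line + "\n"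
--
--     if current_chapter["content"].strip():
--         chapters.append(current_chapter)
--
--     return chapters
-- ===== SOURCE B (Python) =====
-- def _is_heading(line):
--     return line.strip().lower().startswith("chapter") or (line.isupper() and len(line.strip()) < 50)
--
--
-- def chapter_segmentation(text):
--     """Block-at-a-time segmentation: scan to the next heading, slice the whole
--     body in one step, join it, and emit the chapter if it has visible content."""
--     lines = text.split('\n')
--     chapters = []
--     title = "Introduction"
--     i = 0
--     n = len(lines)
--     while True:
--         j = i
--         while j < n and not _is_heading(lines[j]):
--             j += 1
--         content = "".join(l + "\n" for l in lines[i:j])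
--         if content.strip():
--             chapters.append({"title": title, "content": content})
--         if j == n:
--             return chapters
--         title = lines[j].strip()
--         i = j + 1
-- ===== Notes on version B (the rewrite author's own statement) =====
-- stated objective: alternative
-- what changed: A folds line by line while mutating one growing content string; B scans block-at-a-time: an inner loop finds the next heading, the whole body is sliced and joined at once, then the chapter is emitted and the scan resumes after the heading.
import Mathlib
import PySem

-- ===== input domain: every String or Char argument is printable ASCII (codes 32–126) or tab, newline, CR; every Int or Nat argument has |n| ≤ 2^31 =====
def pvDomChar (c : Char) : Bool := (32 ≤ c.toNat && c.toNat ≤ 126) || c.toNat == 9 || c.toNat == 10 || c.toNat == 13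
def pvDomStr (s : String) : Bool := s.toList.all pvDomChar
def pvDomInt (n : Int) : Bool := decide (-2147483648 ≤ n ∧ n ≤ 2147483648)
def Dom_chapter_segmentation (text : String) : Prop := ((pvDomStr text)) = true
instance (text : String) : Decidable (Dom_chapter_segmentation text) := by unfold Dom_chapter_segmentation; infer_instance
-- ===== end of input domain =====

-- B replaces A's line-by-line fold (with a mutable current-chapter string) by a block-at-a-time
-- scan (inner loop to the next heading, slice + join the body at once); alternative decomposition,
-- same return value.

-- shared helper: Python's
--   line.strip().lower().startswith("chapter") or (line.isupper() and len(line.strip()) < 50)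
-- str.isupper() = at least one cased character and no lowercase one; on the ASCII domain
-- the cased characters are exactly the letters, so this rendering is exact on Dom.
def pvStrIsupper (l : List Char) : Bool :=
  l.any PySem.Chars.isalpha && l.all (fun c => !PySem.Chars.islower c)

def pvIsHeading (l : List Char) : Bool :=
  PySem.Chars.startswith (PySem.Chars.lower (PySem.Chars.strip l)) ("chapter".toList)
  || (pvStrIsupper l && decide (PySem.Chars.len (PySem.Chars.strip l) < 50))

-- the dict {"title": t, "content": c} (always exactly these two keys, in this order)
def pvChapter (t c : List Char) : List (String × String) :=
  [("title", String.ofList t), ("content", String.ofList c)]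

-- ===== PORT A =====
-- A's loop: state = (chapters, current title, current content), one line at a time.
def chapter_segmentation (text : String) : List (List (String × String)) :=
  let lines := PySem.Chars.splitOn text.toList ['\n']
  let fin := lines.foldl
    (fun (st : List (List (String × String)) × List Char × List Char) line =>
      let (chapters, title, content) := st
      if pvIsHeading line then
        ((if (PySem.Chars.strip content).isEmpty then chapters else chapters ++ [pvChapter title content]),
         PySem.Chars.strip line, [])
      else
        (chapters, title, content ++ line ++ ['\n']))
    ([], "Introduction".toList, [])
  if (PySem.Chars.strip fin.2.2).isEmpty then fin.1 else fin.1 ++ [pvChapter fin.2.1 fin.2.2]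

-- ===== PORT B =====
-- Source B's outer while-loop over blocks; the inner index scan 'while j < n and not heading' and the
-- slice lines[i:j] are rendered as takeWhile/dropWhile on the remaining suffix of lines.
def pvSegLoop (chapters : List (List (String × String))) (title : List Char)
    (lines : List (List Char)) : List (List (String × String)) :=
  let body := lines.takeWhile (fun l => !pvIsHeading l)
  let content := (body.map (fun l => l ++ ['\n'])).flatten
  let chapters' := if (PySem.Chars.strip content).isEmpty then chapters
                   else chapters ++ [pvChapter title content]
  match hr : lines.dropWhile (fun l => !pvIsHeading l) with
  | [] => chapters'
  | h :: t => pvSegLoop chapters' (PySem.Chars.strip h) t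
termination_by lines.length
decreasing_by
  have h1 : (lines.dropWhile (fun l => !pvIsHeading l)).length ≤ lines.length :=
    List.length_dropWhile_le _ _
  rw [hr] at h1; simp at h1 ⊢; omega

def chapter_segmentation_alt (text : String) : List (List (String × String)) :=
  pvSegLoop [] ("Introduction".toList) (PySem.Chars.splitOn text.toList ['\n'])

-- ===== PRECONDITION & SPEC =====
def Spec_chapter_segmentation (text : String) (out : List (List (String × String))) : Prop := out = chapter_segmentation_alt text
instance (text : String) (out : List (List (String × String))) : Decidable (Spec_chapter_segmentation text out) := by unfold Spec_chapter_segmentation; infer_instance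

-- ===== CLAIM (what is proved, stated in full; the proofs are below) =====
def Claim_equal_chapter_segmentation : Prop := ∀ (text : String), Dom_chapter_segmentation text → Spec_chapter_segmentation text (chapter_segmentation text)

-- ===== LEMMAS AND PROOFS =====

-- proof intermediary: A's fold fused with its final flush, as structural recursion on the lines
def pvSegG (ch : List (List (String × String))) (t c : List Char)
    (lines : List (List Char)) : List (List (String × String)) :=
  match lines with
  | [] => if (PySem.Chars.strip c).isEmpty then ch else ch ++ [pvChapter t c]
  | l :: ls =>
      if pvIsHeading l then
        pvSegG (if (PySem.Chars.strip c).isEmpty then ch else ch ++ [pvChapter t c])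
          (PySem.Chars.strip l) [] ls
      else
        pvSegG ch t (c ++ l ++ ['\n']) ls

-- A-side: the fold followed by the final flush is pvSegG
theorem pvA_eq_segG (lines : List (List Char)) :
    ∀ ch t c,
      (let fin := lines.foldl
        (fun (st : List (List (String × String)) × List Char × List Char) line =>
          let (chapters, title, content) := st
          if pvIsHeading line then
            ((if (PySem.Chars.strip content).isEmpty then chapters else chapters ++ [pvChapter title content]),
             PySem.Chars.strip line, [])
          else
            (chapters, title, content ++ line ++ ['\n']))
        (ch, t, c)
       if (PySem.Chars.strip fin.2.2).isEmpty then fin.1 else fin.1 ++ [pvChapter fin.2.1 fin.2.2])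
      = pvSegG ch t c lines := by
  induction lines with
  | nil => intro ch t c; simp [pvSegG]
  | cons l ls ih =>
      intro ch t c
      simp only [List.foldl_cons, pvSegG]
      by_cases h : pvIsHeading l = true
      · simp only [h, if_true]; exact ih _ _ _
      · simp only [Bool.not_eq_true] at h; simp only [h, Bool.false_eq_true, if_false]
        exact ih _ _ _

-- pvSegG processes a whole headed-block in one step (the shape of pvSegLoop's body)
theorem pvSegG_block (lines : List (List Char)) :
    ∀ ch t c,
      pvSegG ch t c lines =
        (let body := lines.takeWhile (fun l => !pvIsHeading l)
         let content := c ++ (body.map (fun l => l ++ ['\n'])).flatten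
         let ch' := if (PySem.Chars.strip content).isEmpty then ch else ch ++ [pvChapter t content]
         match lines.dropWhile (fun l => !pvIsHeading l) with
         | [] => ch'
         | h :: t' => pvSegG ch' (PySem.Chars.strip h) [] t') := by
  induction lines with
  | nil => intro ch t c; simp [pvSegG]
  | cons l ls ih =>
      intro ch t c
      by_cases h : pvIsHeading l = true
      · simp [pvSegG, h]
      · simp only [Bool.not_eq_true] at h
        simp only [pvSegG, Bool.false_eq_true, if_false,
          List.takeWhile_cons, List.dropWhile_cons, h, Bool.not_false, if_true]
        rw [ih]
        simp [List.append_assoc]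

-- B-side: pvSegLoop is pvSegG with an empty pending content
theorem pvSegLoop_eq_segG (lines : List (List Char)) (ch : List (List (String × String)))
    (t : List Char) : pvSegLoop ch t lines = pvSegG ch t [] lines := by
  unfold pvSegLoop
  rw [pvSegG_block]
  simp only [List.nil_append]
  split
  · next hr => simp only [hr]
  · next h t' hr =>
      have hlt : t'.length < lines.length := by
        have h1 := List.length_dropWhile_le (fun l => !pvIsHeading l) lines
        rw [hr] at h1; simp at h1; omega
      simp only [hr]
      exact pvSegLoop_eq_segG t' _ _
termination_by lines.length
decreasing_by exact hlt

-- ===== VERDICT (by name: the statement is the Claim_ definition above) =====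
theorem chapter_segmentation_spec : Claim_equal_chapter_segmentation := by
  intro text _
  unfold Spec_chapter_segmentation chapter_segmentation chapter_segmentation_alt
  rw [pvA_eq_segG, pvSegLoop_eq_segG]
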